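-- pv_equiv track=rewrite | github.com/breninhoinho/Ic | Projeto/Algoritmos_Mapeamento/NSGA2.py | calcular_tolerancia_falha
-- ===== SOURCE A (Python) =====
-- def calcular_tolerancia_falha(mapeamento, matrix, dimensao):
--     """
--     Conta pares de células vizinhas que ambas têm tarefas alocadas.
--     Quanto maior, mais tarefas estão próximas — mais caminhos alternativos existem.
--     Retornamos negativo porque o NSGA-II minimiza todos os objetivos.
--     """
--     direcoes = [(-1, 0), (1, 0), (0, -1), (0, 1)]
--     tolerancia = 0
--     for i in range(len(mapeamento)):
--         for j in range(len(mapeamento[i])):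
--             if mapeamento[i][j] != '':
--                 for dx, dy in direcoes:
--                     x, y = i + dx, j + dy
--                     if 0 <= x < len(mapeamento) and 0 <= y < len(mapeamento[0]):
--                         if mapeamento[x][y] != '':
--                             tolerancia += 1
--     return tolerancia
-- ===== SOURCE B (Python) =====
-- def calcular_tolerancia_falha(mapeamento, matrix, dimensao):
--     total = 0
--     for row in mapeamento:
--         for a, b in zip(row, row[1:]):
--             if a != '' and b != '':
--                 total += 2
--     for r1, r2 in zip(mapeamento, mapeamento[1:]):
--         for a, b in zip(r1, r2):
--             if a != '' and b != '':
--                 total += 2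
--     return total
-- ===== Notes on version B (the rewrite author's own statement) =====
-- stated objective: faster
-- what changed: B replaces A's per-cell probing of the 4 neighbours (each probe with two bounds checks and two chained grid indexings) by two plain line sweeps that add 2 per adjacent non-empty pair: consecutive cells within each row, and aligned cells of each pair of adjacent rows.
-- intended difference: On ragged grids whose first row is shorter than a later row containing an adjacent non-empty pair whose second cell sits at a column >= len(mapeamento[0]), A silently drops those pairs (its column bound is always len(mapeamento[0])) and returns an undercount (e.g. 3 on [['a'],['b','c']]), while B counts every adjacent non-empty pair (4 there), which is the documented intent ('conta pares de celulas vizinhas que ambas tem tarefas alocadas'). — e.g. on calcular_tolerancia_falha([["a"], ["b", "c"]], [], 0): A returns 3, B returns 4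
import Mathlib
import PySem

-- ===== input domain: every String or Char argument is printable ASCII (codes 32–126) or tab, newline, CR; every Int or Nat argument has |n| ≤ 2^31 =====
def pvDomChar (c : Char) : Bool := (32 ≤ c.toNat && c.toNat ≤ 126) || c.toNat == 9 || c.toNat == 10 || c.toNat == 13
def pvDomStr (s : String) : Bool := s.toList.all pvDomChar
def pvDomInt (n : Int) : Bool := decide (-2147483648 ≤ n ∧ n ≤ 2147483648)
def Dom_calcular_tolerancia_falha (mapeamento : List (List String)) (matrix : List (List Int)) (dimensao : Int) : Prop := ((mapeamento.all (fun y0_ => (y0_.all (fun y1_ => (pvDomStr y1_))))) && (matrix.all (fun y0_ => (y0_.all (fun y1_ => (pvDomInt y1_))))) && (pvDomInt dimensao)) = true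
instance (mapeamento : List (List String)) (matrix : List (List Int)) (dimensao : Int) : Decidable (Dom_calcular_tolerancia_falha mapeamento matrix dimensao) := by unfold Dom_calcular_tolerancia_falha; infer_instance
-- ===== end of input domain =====

-- B counts adjacent non-empty pairs by two line sweeps (within each row, and across adjacent
-- rows) instead of probing the 4 neighbours of every cell (measured faster by a constant
-- factor); on ragged grids where A's fixed column bound len(mapeamento[0]) drops pairs,
-- B counts them (stated as D_ below).

-- ===== PORT A =====
-- mapeamento[x][y]; total helper: returns "" exactly where Python raises IndexError (such inputs are outside Pre_)
def pvCellA (m : List (List String)) (x y : Int) : String :=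
  ((PySem.List.pyGet? m x).bind (fun row => PySem.List.pyGet? row y)).getD ""

def calcular_tolerancia_falha (mapeamento : List (List String)) (matrix : List (List Int)) (dimensao : Int) : Int :=
  let direcoes : List (Int × Int) := [(-1, 0), (1, 0), (0, -1), (0, 1)]
  (PySem.List.pyRange 0 (mapeamento.length : Int) 1).foldl (fun tolerancia i =>
    (PySem.List.pyRange 0 ((((PySem.List.pyGet? mapeamento i).getD []).length : Nat) : Int) 1).foldl (fun tolerancia j =>
      if pvCellA mapeamento i j ≠ "" then
        direcoes.foldl (fun tolerancia dxy =>
          let x := i + dxy.1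
          let y := j + dxy.2
          if 0 ≤ x ∧ x < (mapeamento.length : Int) ∧ 0 ≤ y ∧ y < ((mapeamento.headD []).length : Int) then
            if pvCellA mapeamento x y ≠ "" then tolerancia + 1 else tolerancia
          else tolerancia) tolerancia
      else tolerancia) tolerancia) 0

-- ===== PORT B =====
def calcular_tolerancia_falha_alt (mapeamento : List (List String)) (matrix : List (List Int)) (dimensao : Int) : Int :=
  let total : Int := mapeamento.foldl (fun total row =>
    (row.zip (PySem.List.slice row (some 1) none)).foldl
      (fun total p => if p.1 ≠ "" ∧ p.2 ≠ "" then total + 2 else total) total) 0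
  (mapeamento.zip (PySem.List.slice mapeamento (some 1) none)).foldl (fun total rr =>
    (rr.1.zip rr.2).foldl
      (fun total p => if p.1 ≠ "" ∧ p.2 ≠ "" then total + 2 else total) total) total

-- ===== PRECONDITION & SPEC =====
-- Pre_ holds exactly on the inputs where Python A returns normally: it excludes only the inputs
-- on which A raises IndexError (a non-empty cell of a jagged grid whose in-bounds neighbour
-- position is missing from a shorter row).
def Pre_calcular_tolerancia_falha (mapeamento : List (List String)) (matrix : List (List Int)) (dimensao : Int) : Prop :=
  ∀ i < mapeamento.length, ∀ j < (mapeamento.getD i []).length,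
    (mapeamento.getD i []).getD j "" ≠ "" →
      (j + 1 < (mapeamento.headD []).length → j + 1 < (mapeamento.getD i []).length) ∧
      (i + 1 < mapeamento.length ∧ j < (mapeamento.headD []).length → j < (mapeamento.getD (i+1) []).length) ∧
      (1 ≤ i ∧ j < (mapeamento.headD []).length → j < (mapeamento.getD (i-1) []).length)
instance (mapeamento : List (List String)) (matrix : List (List Int)) (dimensao : Int) : Decidable (Pre_calcular_tolerancia_falha mapeamento matrix dimensao) := by unfold Pre_calcular_tolerancia_falha; exact Nat.decidableBallLT _ _

def pvWitness_calcular_tolerancia_falha : List (List String) × List (List Int) × Int :=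
  ([["a", ""], ["a", "b"]], [], 0)

-- pvE m i j: cell (i,j) holds a task (false out of range)
def pvE (m : List (List String)) (i j : Nat) : Bool := (m.getD i []).getD j "" != ""

-- On ragged grids whose first row is shorter than a later row holding an adjacent non-empty pair at a
-- column ≥ len(mapeamento[0]), A silently drops those pairs (its column bound is always len(mapeamento[0]))
-- and returns an undercount, while B counts every adjacent non-empty pair, which is the documented intent.
def D_calcular_tolerancia_falha (mapeamento : List (List String)) (matrix : List (List Int)) (dimensao : Int) : Prop :=
  ∃ v, ∃ i < mapeamento.length, ∃ j < mapeamento.flatten.length,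
    pvE mapeamento i j ∧ pvE mapeamento (i + cond v 1 0) (j + cond v 0 1) ∧
      mapeamento.headI.length ≤ j + cond v 0 1
instance (mapeamento : List (List String)) (matrix : List (List Int)) (dimensao : Int) : Decidable (D_calcular_tolerancia_falha mapeamento matrix dimensao) := by unfold D_calcular_tolerancia_falha; infer_instance

def Spec_calcular_tolerancia_falha (mapeamento : List (List String)) (matrix : List (List Int)) (dimensao : Int) (out : Int) : Prop := ¬ D_calcular_tolerancia_falha mapeamento matrix dimensao → out = calcular_tolerancia_falha_alt mapeamento matrix dimensao
instance (mapeamento : List (List String)) (matrix : List (List Int)) (dimensao : Int) (out : Int) : Decidable (Spec_calcular_tolerancia_falha mapeamento matrix dimensao out) := by unfold Spec_calcular_tolerancia_falha; infer_instance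

def pvDiffWitness_calcular_tolerancia_falha : List (List String) × List (List Int) × Int :=
  ([["a"], ["b", "c"]], [], 0)
def pvDiffWitnessOut_calcular_tolerancia_falha : Int × Int := (3, 4)

-- ===== CLAIM (what is proved, stated in full; the proofs are below) =====
def Claim_unchanged_calcular_tolerancia_falha : Prop := ∀ (mapeamento : List (List String)) (matrix : List (List Int)) (dimensao : Int), Dom_calcular_tolerancia_falha mapeamento matrix dimensao → Pre_calcular_tolerancia_falha mapeamento matrix dimensao → Spec_calcular_tolerancia_falha mapeamento matrix dimensao (calcular_tolerancia_falha mapeamento matrix dimensao)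
def Claim_changed_calcular_tolerancia_falha : Prop := Dom_calcular_tolerancia_falha (pvDiffWitness_calcular_tolerancia_falha.1) (pvDiffWitness_calcular_tolerancia_falha.2.1) (pvDiffWitness_calcular_tolerancia_falha.2.2) ∧ Pre_calcular_tolerancia_falha (pvDiffWitness_calcular_tolerancia_falha.1) (pvDiffWitness_calcular_tolerancia_falha.2.1) (pvDiffWitness_calcular_tolerancia_falha.2.2) ∧ D_calcular_tolerancia_falha (pvDiffWitness_calcular_tolerancia_falha.1) (pvDiffWitness_calcular_tolerancia_falha.2.1) (pvDiffWitness_calcular_tolerancia_falha.2.2) ∧ calcular_tolerancia_falha (pvDiffWitness_calcular_tolerancia_falha.1) (pvDiffWitness_calcular_tolerancia_falha.2.1) (pvDiffWitness_calcular_tolerancia_falha.2.2) = pvDiffWitnessOut_calcular_tolerancia_falha.1 ∧ calcular_tolerancia_falha_alt (pvDiffWitness_calcular_tolerancia_falha.1) (pvDiffWitness_calcular_tolerancia_falha.2.1) (pvDiffWitness_calcular_tolerancia_falha.2.2) = pvDiffWitnessOut_calcular_tolerancia_falha.2 ∧ pvDiffWitnessOut_calcular_tolerancia_falha.1 ≠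 pvDiffWitnessOut_calcular_tolerancia_falha.2
def Claim_exact_calcular_tolerancia_falha : Prop := ∀ (mapeamento : List (List String)) (matrix : List (List Int)) (dimensao : Int), Dom_calcular_tolerancia_falha mapeamento matrix dimensao → Pre_calcular_tolerancia_falha mapeamento matrix dimensao → D_calcular_tolerancia_falha mapeamento matrix dimensao → calcular_tolerancia_falha mapeamento matrix dimensao ≠ calcular_tolerancia_falha_alt mapeamento matrix dimensao

-- ===== LEMMAS AND PROOFS =====
def pvNbr (m : List (List String)) (i j : Nat) : Int :=
  (if (1 ≤ i ∧ j < (m.headD []).length) ∧ pvE m (i-1) j then (1 : Int) else 0) +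
  (if (i + 1 < m.length ∧ j < (m.headD []).length) ∧ pvE m (i+1) j then (1 : Int) else 0) +
  (if (1 ≤ j ∧ j - 1 < (m.headD []).length) ∧ pvE m i (j-1) then (1 : Int) else 0) +
  (if (j + 1 < (m.headD []).length) ∧ pvE m i (j+1) then (1 : Int) else 0)

def pvContrib (m : List (List String)) (i j : Nat) : Int :=
  if pvE m i j then pvNbr m i j else 0

def pvBH (m : List (List String)) : Int :=
  ∑ i ∈ Finset.range m.length, ∑ j ∈ Finset.range ((m.getD i []).length - 1),
    if pvE m i j ∧ pvE m i (j+1) then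
      (if j + 1 < (m.headD []).length then (1:Int) else 0) +
      (if j < (m.headD []).length then (1:Int) else 0)
    else 0

def pvBV (m : List (List String)) : Int :=
  ∑ i ∈ Finset.range (m.length - 1),
    ∑ j ∈ Finset.range (min (m.getD i []).length (m.getD (i+1) []).length),
    if pvE m i j ∧ pvE m (i+1) j ∧ j < (m.headD []).length then (2:Int) else 0

def pvBH2 (m : List (List String)) : Int :=
  ∑ i ∈ Finset.range m.length, ∑ j ∈ Finset.range ((m.getD i []).length - 1),
    if pvE m i j ∧ pvE m i (j+1) then (2:Int) else 0

def pvBV2 (m : List (List String)) : Int :=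
  ∑ i ∈ Finset.range (m.length - 1),
    ∑ j ∈ Finset.range (min (m.getD i []).length (m.getD (i+1) []).length),
    if pvE m i j ∧ pvE m (i+1) j then (2:Int) else 0

lemma pv_listRangeSum (n : Nat) (f : Nat → Int) :
    ((List.range n).map f).sum = ∑ i ∈ Finset.range n, f i := by
  induction n with
  | zero => simp
  | succ n ih => rw [List.range_succ, Finset.sum_range_succ]; simp [ih]

lemma pv_sum_map_getD {α : Type} [Inhabited α] (l : List α) (f : α → Int) :
    (l.map f).sum = ∑ j ∈ Finset.range l.length, f (l.getD j default) := by
  induction l with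
  | nil => simp
  | cons x l ih => rw [List.length_cons, Finset.sum_range_succ']; simp [ih]; ring

lemma pvE_out (m : List (List String)) (i j : Nat) (h : (m.getD i []).length ≤ j) :
    pvE m i j = false := by
  unfold pvE
  rw [List.getD_eq_default _ _ h]
  simp

lemma pvE_lt (m : List (List String)) (i j : Nat) (h : pvE m i j = true) :
    i < m.length ∧ j < (m.getD i []).length := by
  constructor
  · by_contra hi
    have hnone : m[i]? = none := by rw [List.getElem?_eq_none_iff]; omega
    simp [pvE, List.getD, hnone] at h
  · by_contra hj
    rw [pvE_out m i j (by omega)] at h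
    exact absurd h (by simp)

lemma pvCellA_nat (m : List (List String)) (a b : Nat) :
    pvCellA m (a : Int) (b : Int) = (m.getD a []).getD b "" := by
  unfold pvCellA
  rw [PySem.List.pyGet?_natCast]
  by_cases ha : a < m.length
  · rw [List.getElem?_eq_getElem ha, List.getD_eq_getElem _ _ ha]
    simp [PySem.List.pyGet?_natCast, List.getD_eq_getElem?_getD]
  · have h1 : m[a]? = none := by rw [List.getElem?_eq_none_iff]; omega
    have h2 : m.getD a [] = [] := List.getD_eq_default m (d := []) (by omega)
    rw [h1, h2]
    simp

lemma pv_if2 (c1 c2 : Prop) [Decidable c1] [Decidable c2] (t : Int) :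
    (if c1 then (if c2 then t + 1 else t) else t) = t + (if c1 ∧ c2 then 1 else 0) := by
  split_ifs <;> simp_all

lemma pv_nbr_step (m : List (List String)) (i j : Nat)
    (dx dy : Int) (a b : Nat) (c : Prop) [Decidable c]
    (hx : (0 ≤ (i:Int) + dx ∧ (i:Int) + dx < (m.length:Int) ∧ 0 ≤ (j:Int) + dy ∧ (j:Int) + dy < ((m.headD []).length:Int)) ↔ c)
    (ha : c → ((i:Int) + dx = (a:Int) ∧ (j:Int) + dy = (b:Int))) :
    (if (0 ≤ (i:Int) + dx ∧ (i:Int) + dx < (m.length:Int) ∧ 0 ≤ (j:Int) + dy ∧ (j:Int) + dy < ((m.headD []).length:Int)) ∧ pvCellA m ((i:Int) + dx) ((j:Int) + dy) ≠ "" then (1:Int) else 0)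
    = (if c ∧ pvE m a b then 1 else 0) := by
  by_cases hc : c
  · obtain ⟨ea, eb⟩ := ha hc
    rw [ea, eb, pvCellA_nat m a b]
    simp [hx, hc, pvE, bne]
    split_ifs <;> simp_all
  · have h1 : ¬(0 ≤ (i:Int) + dx ∧ (i:Int) + dx < (m.length:Int) ∧ 0 ≤ (j:Int) + dy ∧ (j:Int) + dy < ((m.headD []).length:Int)) := fun h => hc (hx.mp h)
    rw [if_neg (fun h => h1 h.1), if_neg (fun h => hc h.1)]

lemma pv_dirFold (m : List (List String)) (i j : Nat) (hi : i < m.length) (t : Int) :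
    ([((-1:Int), (0:Int)), (1, 0), (0, -1), (0, 1)]).foldl (fun tolerancia dxy =>
      let x := (i:Int) + dxy.1
      let y := (j:Int) + dxy.2
      if 0 ≤ x ∧ x < (m.length : Int) ∧ 0 ≤ y ∧ y < ((m.headD []).length : Int) then
        if pvCellA m x y ≠ "" then tolerancia + 1 else tolerancia
      else tolerancia) t = t + pvNbr m i j := by
  simp only [List.foldl_cons, List.foldl_nil]
  simp only [pv_if2]
  rw [pv_nbr_step m i j (-1) 0 (i-1) j (1 ≤ i ∧ j < (m.headD []).length) (by omega) (by intro h; omega),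
      pv_nbr_step m i j 1 0 (i+1) j (i + 1 < m.length ∧ j < (m.headD []).length) (by omega) (by intro h; omega),
      pv_nbr_step m i j 0 (-1) i (j-1) (1 ≤ j ∧ j - 1 < (m.headD []).length) (by omega) (by intro h; omega),
      pv_nbr_step m i j 0 1 i (j+1) (j + 1 < (m.headD []).length) (by omega) (by intro h; omega)]
  unfold pvNbr
  ring

lemma pv_jloop (m : List (List String)) (i : Nat) (hi : i < m.length) (t : Int) :
    (PySem.List.pyRange 0 ((((PySem.List.pyGet? m (i : Int)).getD []).length : Nat) : Int) 1).foldl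
      (fun tolerancia j =>
        if pvCellA m (i : Int) j ≠ "" then
          ([((-1:Int), (0:Int)), (1, 0), (0, -1), (0, 1)]).foldl (fun tolerancia dxy =>
            let x := (i : Int) + dxy.1
            let y := j + dxy.2
            if 0 ≤ x ∧ x < (m.length : Int) ∧ 0 ≤ y ∧ y < ((m.headD []).length : Int) then
              if pvCellA m x y ≠ "" then tolerancia + 1 else tolerancia
            else tolerancia) tolerancia
        else tolerancia) t
    = t + ∑ j ∈ Finset.range (m.getD i []).length, pvContrib m i j := by
  have hget : (PySem.List.pyGet? m (i : Int)).getD [] = m.getD i [] := by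
    simp [PySem.List.pyGet?_natCast, List.getElem?_eq_getElem hi, List.getD_eq_getElem _ _ hi]
  rw [hget, PySem.List.pyRange_zero_natCast, List.foldl_map]
  refine Eq.trans (PySem.List.foldl_congr_mem _ _ (fun t (j : Nat) => t + pvContrib m i j) _ ?_) ?_
  swap
  · rw [PySem.List.foldl_add, pv_listRangeSum]
  intro acc j _
  have hcell : pvCellA m (i : Int) (j : Int) = (m.getD i []).getD j "" := pvCellA_nat m i j
  by_cases he : pvE m i j
  · rw [if_pos (by rw [hcell]; simpa [pvE, bne] using he)]
    rw [pv_dirFold m i j hi acc]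
    simp [pvContrib, he]
  · rw [if_neg (by rw [hcell]; simpa [pvE, bne] using he)]
    simp [pvContrib, he]

lemma pv_A_eq_sum (m : List (List String)) (mat : List (List Int)) (dd : Int) :
    calcular_tolerancia_falha m mat dd =
      ∑ i ∈ Finset.range m.length, ∑ j ∈ Finset.range (m.getD i []).length, pvContrib m i j := by
  unfold calcular_tolerancia_falha
  rw [PySem.List.pyRange_zero_natCast, List.foldl_map]
  refine Eq.trans (PySem.List.foldl_congr_mem _ _
        (fun t (i : Nat) => t + ∑ j ∈ Finset.range (m.getD i []).length, pvContrib m i j) _ ?_) ?_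
  swap
  · rw [PySem.List.foldl_add, pv_listRangeSum]
    simp
  intro acc i hi
  exact pv_jloop m i (List.mem_range.mp hi) acc

lemma pv_pair_body :
    (fun (total : Int) (p : String × String) =>
        if p.1 ≠ "" ∧ p.2 ≠ "" then total + 2 else total)
      = (fun total p => total + (if p.1 ≠ "" ∧ p.2 ≠ "" then (2:Int) else 0)) := by
  funext total p
  by_cases hc : p.1 ≠ "" ∧ p.2 ≠ "" <;> simp [hc]

lemma pv_vrow2 (r1 r2 : List String) (t : Int) :
    (r1.zip r2).foldl
      (fun total p => if p.1 ≠ "" ∧ p.2 ≠ "" then total + 2 else total) t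
    = t + ∑ k ∈ Finset.range (min r1.length r2.length),
        (if r1.getD k "" ≠ "" ∧ r2.getD k "" ≠ "" then (2:Int) else 0) := by
  rw [pv_pair_body, PySem.List.foldl_add, pv_sum_map_getD]
  have hlen : (r1.zip r2).length = min r1.length r2.length := by simp [List.length_zip]
  rw [hlen]
  congr 1
  refine Finset.sum_congr rfl (fun k hk => ?_)
  have hk' : k < min r1.length r2.length := Finset.mem_range.mp hk
  rw [List.getD_eq_getElem _ _ (by rw [hlen]; exact hk'), List.getElem_zip]
  rw [List.getD_eq_getElem _ _ (by omega : k < r1.length),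
      List.getD_eq_getElem _ _ (by omega : k < r2.length)]

lemma pv_B_eq_sum (m : List (List String)) (mat : List (List Int)) (dd : Int) :
    calcular_tolerancia_falha_alt m mat dd = pvBH2 m + pvBV2 m := by
  unfold calcular_tolerancia_falha_alt
  simp only [PySem.List.slice_from_one, pv_vrow2, PySem.List.foldl_add]
  have hH : ((m.map (fun row => ∑ k ∈ Finset.range (min row.length row.tail.length),
        (if row.getD k "" ≠ "" ∧ row.tail.getD k "" ≠ "" then (2:Int) else 0))).sum) = pvBH2 m := by
    rw [pv_sum_map_getD]
    simp only [show (default : List String) = [] from rfl]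
    unfold pvBH2
    refine Finset.sum_congr rfl (fun i _ => ?_)
    have hmin : min (m.getD i []).length (m.getD i []).tail.length = (m.getD i []).length - 1 := by
      rw [List.length_tail]; omega
    rw [hmin]
    refine Finset.sum_congr rfl (fun k hk => ?_)
    have hk' : k < (m.getD i []).length - 1 := Finset.mem_range.mp hk
    rw [List.getD_eq_getElem (m.getD i []).tail _ (by rw [List.length_tail]; omega),
        List.getElem_tail, ← List.getD_eq_getElem (m.getD i []) (d := "") (by omega : k + 1 < (m.getD i []).length)]
    simp only [pvE, bne_iff_ne]
  have hV : (((m.zip m.tail).map (fun rr => ∑ k ∈ Finset.range (min rr.1.length rr.2.length),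
        (if rr.1.getD k "" ≠ "" ∧ rr.2.getD k "" ≠ "" then (2:Int) else 0))).sum) = pvBV2 m := by
    rw [pv_sum_map_getD]
    simp only [show (default : List String × List String) = ([], []) from rfl]
    have hlen : (m.zip m.tail).length = m.length - 1 := by simp [List.length_zip]
    rw [hlen]
    unfold pvBV2
    refine Finset.sum_congr rfl (fun i hi => ?_)
    have hi' : i < m.length - 1 := Finset.mem_range.mp hi
    rw [List.getD_eq_getElem _ _ (by simp [List.length_zip]; omega : i < (m.zip m.tail).length), List.getElem_zip]
    simp only [List.getElem_tail]
    have e1 : m[i]'(by omega) = m.getD i [] := (List.getD_eq_getElem _ _ (by omega)).symm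
    have e2 : m[i+1]'(by omega) = m.getD (i+1) [] := (List.getD_eq_getElem _ _ (by omega)).symm
    rw [e1, e2]
    refine Finset.sum_congr rfl (fun k _ => ?_)
    simp only [pvE, bne_iff_ne]
  rw [hH, hV]
  ring

lemma pv_sum_trunc (L M : Nat) (hML : M ≤ L) (f : Nat → Int)
    (h0 : ∀ j, M ≤ j → j < L → f j = 0) :
    ∑ j ∈ Finset.range L, f j = ∑ j ∈ Finset.range M, f j := by
  refine (Finset.sum_subset (fun x hx => ?_) (fun x hx hnx => ?_)).symm
  · exact Finset.mem_range.mpr (by have := Finset.mem_range.mp hx; omega)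
  exact h0 x (by simpa using hnx) (by simpa using hx)

lemma pv_contrib_split (m : List (List String)) (i j : Nat) :
    pvContrib m i j =
      (if (pvE m i j : Prop) ∧ ((1 ≤ i ∧ j < (m.headD []).length) ∧ (pvE m (i-1) j : Prop)) then (1:Int) else 0) +
      (if (pvE m i j : Prop) ∧ ((i + 1 < m.length ∧ j < (m.headD []).length) ∧ (pvE m (i+1) j : Prop)) then (1:Int) else 0) +
      (if (pvE m i j : Prop) ∧ ((1 ≤ j ∧ j - 1 < (m.headD []).length) ∧ (pvE m i (j-1) : Prop)) then (1:Int) else 0) +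
      (if (pvE m i j : Prop) ∧ ((j + 1 < (m.headD []).length) ∧ (pvE m i (j+1) : Prop)) then (1:Int) else 0) := by
  unfold pvContrib pvNbr
  by_cases he : pvE m i j
  · simp [he]
  · simp [he]

lemma pv_right_i (m : List (List String)) (i : Nat) :
    (∑ j ∈ Finset.range (m.getD i []).length,
      if (pvE m i j : Prop) ∧ (((j + 1 < (m.headD []).length) : Prop) ∧ (pvE m i (j+1) : Prop)) then (1:Int) else 0)
    = ∑ j ∈ Finset.range ((m.getD i []).length - 1),
      (if (pvE m i j : Prop) ∧ (pvE m i (j+1) : Prop) then (if j + 1 < (m.headD []).length then (1:Int) else 0) else 0) := by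
  rw [pv_sum_trunc _ ((m.getD i []).length - 1) (by omega) _ (fun j hj1 hj2 => by
    have h := pvE_out m i (j+1) (by omega)
    simp [h])]
  refine Finset.sum_congr rfl (fun j _ => ?_)
  have hiff : ((pvE m i j : Prop) ∧ (((j + 1 < (m.headD []).length) : Prop) ∧ (pvE m i (j+1) : Prop)))
      ↔ (((pvE m i j : Prop) ∧ (pvE m i (j+1) : Prop)) ∧ j + 1 < (m.headD []).length) := by tauto
  simp only [hiff, ite_and]

lemma pv_left_i (m : List (List String)) (i : Nat) :
    (∑ j ∈ Finset.range (m.getD i []).length,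
      if (pvE m i j : Prop) ∧ ((1 ≤ j ∧ j - 1 < (m.headD []).length) ∧ (pvE m i (j-1) : Prop)) then (1:Int) else 0)
    = ∑ j ∈ Finset.range ((m.getD i []).length - 1),
      (if (pvE m i j : Prop) ∧ (pvE m i (j+1) : Prop) then (if j < (m.headD []).length then (1:Int) else 0) else 0) := by
  rcases hL : (m.getD i []).length with _ | L'
  · simp
  · rw [Finset.sum_range_succ']
    have h0 : (if (pvE m i 0 : Prop) ∧ ((1 ≤ 0 ∧ 0 - 1 < (m.headD []).length) ∧ (pvE m i (0-1) : Prop)) then (1:Int) else 0) = 0 := by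
      simp
    rw [h0, add_zero]
    have hr : L' + 1 - 1 = L' := rfl
    rw [hr]
    refine Finset.sum_congr rfl (fun j _ => ?_)
    have harith : j + 1 - 1 = j := rfl
    rw [harith]
    have hiff : ((pvE m i (j+1) : Prop) ∧ ((1 ≤ j + 1 ∧ j < (m.headD []).length) ∧ (pvE m i j : Prop)))
        ↔ (((pvE m i j : Prop) ∧ (pvE m i (j+1) : Prop)) ∧ j < (m.headD []).length) := by
      constructor
      · rintro ⟨a, ⟨_, c⟩, b⟩; exact ⟨⟨b, a⟩, c⟩
      · rintro ⟨⟨b, a⟩, c⟩; exact ⟨a, ⟨by omega, c⟩, b⟩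
    simp only [hiff, ite_and]

lemma pv_down (m : List (List String)) :
    (∑ i ∈ Finset.range m.length, ∑ j ∈ Finset.range (m.getD i []).length,
      if (pvE m i j : Prop) ∧ ((i + 1 < m.length ∧ j < (m.headD []).length) ∧ (pvE m (i+1) j : Prop)) then (1:Int) else 0)
    = ∑ i ∈ Finset.range (m.length - 1),
        ∑ j ∈ Finset.range (min (m.getD i []).length (m.getD (i+1) []).length),
        if ((pvE m i j : Prop) ∧ (pvE m (i+1) j : Prop)) ∧ j < (m.headD []).length then (1:Int) else 0 := by
  rw [pv_sum_trunc _ (m.length - 1) (by omega) _ (fun i hi1 hi2 => by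
    have : ¬ (i + 1 < m.length) := by omega
    simp [this])]
  refine Finset.sum_congr rfl (fun i hi => ?_)
  have hi' : i < m.length - 1 := Finset.mem_range.mp hi
  rw [pv_sum_trunc _ (min (m.getD i []).length (m.getD (i+1) []).length) (by omega) _ (fun j hj1 hj2 => by
    have h := pvE_out m (i+1) j (by omega)
    simp [h])]
  refine Finset.sum_congr rfl (fun j _ => ?_)
  have hiff : ((pvE m i j : Prop) ∧ ((i + 1 < m.length ∧ j < (m.headD []).length) ∧ (pvE m (i+1) j : Prop)))
      ↔ (((pvE m i j : Prop) ∧ (pvE m (i+1) j : Prop)) ∧ j < (m.headD []).length) := by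
    constructor
    · rintro ⟨a, ⟨_, c⟩, b⟩; exact ⟨⟨a, b⟩, c⟩
    · rintro ⟨⟨a, b⟩, c⟩; exact ⟨a, ⟨by omega, c⟩, b⟩
  rw [if_congr hiff rfl rfl]

lemma pv_up (m : List (List String)) :
    (∑ i ∈ Finset.range m.length, ∑ j ∈ Finset.range (m.getD i []).length,
      if (pvE m i j : Prop) ∧ ((1 ≤ i ∧ j < (m.headD []).length) ∧ (pvE m (i-1) j : Prop)) then (1:Int) else 0)
    = ∑ i ∈ Finset.range (m.length - 1),
        ∑ j ∈ Finset.range (min (m.getD i []).length (m.getD (i+1) []).length),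
        if ((pvE m i j : Prop) ∧ (pvE m (i+1) j : Prop)) ∧ j < (m.headD []).length then (1:Int) else 0 := by
  rcases hn : m.length with _ | n'
  · simp [hn]
  · refine Eq.trans (Finset.sum_range_succ' _ _) ?_
    have h0 : (∑ j ∈ Finset.range (m.getD 0 []).length,
        if (pvE m 0 j : Prop) ∧ ((1 ≤ 0 ∧ j < (m.headD []).length) ∧ (pvE m (0-1) j : Prop)) then (1:Int) else 0) = 0 := by
      simp
    rw [h0, add_zero]
    have hr : n' + 1 - 1 = n' := rfl
    rw [hr]
    refine Finset.sum_congr rfl (fun i _ => ?_)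
    rw [pv_sum_trunc _ (min (m.getD i []).length (m.getD (i+1) []).length) (by omega) _ (fun j hj1 hj2 => by
      have h := pvE_out m i j (by omega)
      simp [h])]
    refine Finset.sum_congr rfl (fun j _ => ?_)
    have harith : i + 1 - 1 = i := rfl
    rw [harith]
    have hiff : ((pvE m (i+1) j : Prop) ∧ ((1 ≤ i + 1 ∧ j < (m.headD []).length) ∧ (pvE m i j : Prop)))
        ↔ (((pvE m i j : Prop) ∧ (pvE m (i+1) j : Prop)) ∧ j < (m.headD []).length) := by
      constructor
      · rintro ⟨a, ⟨_, c⟩, b⟩; exact ⟨⟨b, a⟩, c⟩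
      · rintro ⟨⟨b, a⟩, c⟩; exact ⟨a, ⟨by omega, c⟩, b⟩
    rw [if_congr hiff rfl rfl]

lemma pv_sum_eq (m : List (List String)) :
    (∑ i ∈ Finset.range m.length, ∑ j ∈ Finset.range (m.getD i []).length, pvContrib m i j)
      = pvBH m + pvBV m := by
  simp only [pv_contrib_split, Finset.sum_add_distrib]
  rw [pv_up m, pv_down m]
  have hL : (∑ i ∈ Finset.range m.length, ∑ j ∈ Finset.range (m.getD i []).length,
      if (pvE m i j : Prop) ∧ ((1 ≤ j ∧ j - 1 < (m.headD []).length) ∧ (pvE m i (j-1) : Prop)) then (1:Int) else 0)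
      = ∑ i ∈ Finset.range m.length, ∑ j ∈ Finset.range ((m.getD i []).length - 1),
        (if (pvE m i j : Prop) ∧ (pvE m i (j+1) : Prop) then (if j < (m.headD []).length then (1:Int) else 0) else 0) :=
    Finset.sum_congr rfl (fun i _ => pv_left_i m i)
  have hR : (∑ i ∈ Finset.range m.length, ∑ j ∈ Finset.range (m.getD i []).length,
      if (pvE m i j : Prop) ∧ (((j + 1 < (m.headD []).length) : Prop) ∧ (pvE m i (j+1) : Prop)) then (1:Int) else 0)
      = ∑ i ∈ Finset.range m.length, ∑ j ∈ Finset.range ((m.getD i []).length - 1),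
        (if (pvE m i j : Prop) ∧ (pvE m i (j+1) : Prop) then (if j + 1 < (m.headD []).length then (1:Int) else 0) else 0) :=
    Finset.sum_congr rfl (fun i _ => pv_right_i m i)
  rw [hL, hR]
  have hV : (∑ i ∈ Finset.range (m.length - 1),
        ∑ j ∈ Finset.range (min (m.getD i []).length (m.getD (i+1) []).length),
        if ((pvE m i j : Prop) ∧ (pvE m (i+1) j : Prop)) ∧ j < (m.headD []).length then (1:Int) else 0)
      + (∑ i ∈ Finset.range (m.length - 1),
        ∑ j ∈ Finset.range (min (m.getD i []).length (m.getD (i+1) []).length),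
        if ((pvE m i j : Prop) ∧ (pvE m (i+1) j : Prop)) ∧ j < (m.headD []).length then (1:Int) else 0)
      = pvBV m := by
    rw [← Finset.sum_add_distrib]
    unfold pvBV
    refine Finset.sum_congr rfl (fun i _ => ?_)
    rw [← Finset.sum_add_distrib]
    refine Finset.sum_congr rfl (fun j _ => ?_)
    by_cases hc : ((pvE m i j : Prop) ∧ (pvE m (i+1) j : Prop)) ∧ j < (m.headD []).length
    · rw [if_pos hc, if_pos (by tauto)]
      norm_num
    · rw [if_neg hc, if_neg (by tauto)]
      norm_num
  have hH : (∑ i ∈ Finset.range m.length, ∑ j ∈ Finset.range ((m.getD i []).length - 1),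
        (if (pvE m i j : Prop) ∧ (pvE m i (j+1) : Prop) then (if j < (m.headD []).length then (1:Int) else 0) else 0))
      + (∑ i ∈ Finset.range m.length, ∑ j ∈ Finset.range ((m.getD i []).length - 1),
        (if (pvE m i j : Prop) ∧ (pvE m i (j+1) : Prop) then (if j + 1 < (m.headD []).length then (1:Int) else 0) else 0))
      = pvBH m := by
    rw [← Finset.sum_add_distrib]
    unfold pvBH
    refine Finset.sum_congr rfl (fun i _ => ?_)
    rw [← Finset.sum_add_distrib]
    refine Finset.sum_congr rfl (fun j _ => ?_)
    by_cases hc : (pvE m i j : Prop) ∧ (pvE m i (j+1) : Prop)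
    · rw [if_pos hc, if_pos hc, if_pos hc]
      ring
    · rw [if_neg hc, if_neg hc, if_neg hc]
      norm_num
  linarith [hV, hH]

lemma pv_headI (m : List (List String)) : m.headI = m.headD [] := by cases m <;> rfl

lemma pv_mem_le_sum (l : List Nat) (x : Nat) (h : x ∈ l) : x ≤ l.sum := by
  induction l with
  | nil => cases h
  | cons a l ih =>
    rcases List.mem_cons.mp h with rfl | h
    · simp [List.sum_cons]
    · have := ih h
      simp [List.sum_cons]
      omega

lemma pv_row_le_flatten (m : List (List String)) (i : Nat) :
    (m.getD i []).length ≤ m.flatten.length := by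
  by_cases hi : i < m.length
  · rw [List.length_flatten]
    exact pv_mem_le_sum _ _ (List.mem_map.mpr ⟨m.getD i [], (List.getD_eq_getElem _ _ hi) ▸ List.getElem_mem hi, rfl⟩)
  · rw [List.getD_eq_default m (d := []) (by omega)]
    simp

-- ¬D_ makes the clipped per-pair weights of A's count equal to 2, so pvBH/pvBV collapse to pvBH2/pvBV2.
lemma pvBH_eq_of (m : List (List String)) (mat : List (List Int)) (dd : Int)
    (hnD : ¬ D_calcular_tolerancia_falha m mat dd) : pvBH m = pvBH2 m := by
  unfold pvBH pvBH2
  refine Finset.sum_congr rfl (fun i hi => Finset.sum_congr rfl (fun j hj => ?_))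
  by_cases hc : (pvE m i j : Prop) ∧ (pvE m i (j+1) : Prop)
  · rw [if_pos hc, if_pos hc]
    have hw : j + 1 < (m.headD []).length := by
      by_contra hw
      refine hnD ⟨false, i, Finset.mem_range.mp hi, j, ?_, hc.1, by simpa using hc.2, by simp only [pv_headI, cond]; omega⟩
      have := pv_row_le_flatten m i
      have := Finset.mem_range.mp hj
      omega
    rw [if_pos hw, if_pos (by omega : j < (m.headD []).length)]
    norm_num
  · rw [if_neg hc, if_neg hc]

lemma pvBV_eq_of (m : List (List String)) (mat : List (List Int)) (dd : Int)
    (hnD : ¬ D_calcular_tolerancia_falha m mat dd) : pvBV m = pvBV2 m := by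
  unfold pvBV pvBV2
  refine Finset.sum_congr rfl (fun i hi => Finset.sum_congr rfl (fun j hj => ?_))
  by_cases hc : (pvE m i j : Prop) ∧ (pvE m (i+1) j : Prop)
  · have hw : j < (m.headD []).length := by
      by_contra hw
      refine hnD ⟨true, i, by have := Finset.mem_range.mp hi; omega, j, ?_, hc.1, by simpa using hc.2, by simp only [pv_headI, cond]; omega⟩
      have := pv_row_le_flatten m i
      have := Finset.mem_range.mp hj
      omega
    rw [if_pos ⟨hc.1, hc.2, hw⟩, if_pos hc]
  · rw [if_neg (fun h => hc ⟨h.1, h.2.1⟩), if_neg hc]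

lemma pvBH_le (m : List (List String)) : pvBH m ≤ pvBH2 m := by
  unfold pvBH pvBH2
  refine Finset.sum_le_sum (fun i _ => Finset.sum_le_sum (fun j _ => ?_))
  split_ifs <;> norm_num

lemma pvBV_le (m : List (List String)) : pvBV m ≤ pvBV2 m := by
  unfold pvBV pvBV2
  refine Finset.sum_le_sum (fun i _ => Finset.sum_le_sum (fun j _ => ?_))
  split_ifs with h1 h2 h2 <;> try norm_num
  exact absurd ⟨h1.1, h1.2.1⟩ h2

lemma pvBH_lt (m : List (List String)) (i j : Nat)
    (hi : i < m.length) (hj : j < (m.getD i []).length - 1)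
    (h1 : (m.getD i []).getD j "" ≠ "") (h2 : (m.getD i []).getD (j+1) "" ≠ "")
    (hw : (m.headD []).length ≤ j + 1) : pvBH m < pvBH2 m := by
  unfold pvBH pvBH2
  refine Finset.sum_lt_sum (fun k _ => Finset.sum_le_sum (fun l _ => by split_ifs <;> norm_num))
    ⟨i, Finset.mem_range.mpr hi, ?_⟩
  refine Finset.sum_lt_sum (fun l _ => by split_ifs <;> norm_num)
    ⟨j, Finset.mem_range.mpr hj, ?_⟩
  have hc : (pvE m i j : Prop) ∧ (pvE m i (j+1) : Prop) := by
    constructor <;> simpa [pvE, bne_iff_ne] using (by assumption : _)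
  rw [if_pos hc, if_pos hc, if_neg (by omega : ¬ j + 1 < (m.headD []).length)]
  split_ifs <;> norm_num

lemma pvBV_lt (m : List (List String)) (i j : Nat)
    (hi : i < m.length - 1) (hj : j < min (m.getD i []).length (m.getD (i+1) []).length)
    (h1 : (m.getD i []).getD j "" ≠ "") (h2 : (m.getD (i+1) []).getD j "" ≠ "")
    (hw : (m.headD []).length ≤ j) : pvBV m < pvBV2 m := by
  unfold pvBV pvBV2
  refine Finset.sum_lt_sum
    (fun k _ => Finset.sum_le_sum (fun l _ => by
      split_ifs with a b b
      · norm_num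
      · exact absurd ⟨a.1, a.2.1⟩ b
      · norm_num
      · norm_num))
    ⟨i, Finset.mem_range.mpr hi, ?_⟩
  refine Finset.sum_lt_sum (fun l _ => by
      split_ifs with a b b
      · norm_num
      · exact absurd ⟨a.1, a.2.1⟩ b
      · norm_num
      · norm_num)
    ⟨j, Finset.mem_range.mpr hj, ?_⟩
  have hc : (pvE m i j : Prop) ∧ (pvE m (i+1) j : Prop) := by
    constructor <;> simpa [pvE, bne_iff_ne] using (by assumption : _)
  rw [if_pos hc, if_neg (by omega : ¬ ((pvE m i j : Prop) ∧ (pvE m (i+1) j : Prop) ∧ j < (m.headD []).length))]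
  norm_num

-- ===== VERDICT (by name: the statements are the Claim_ definitions above) =====
theorem calcular_tolerancia_falha_spec : Claim_unchanged_calcular_tolerancia_falha := by
  intro m mat d _ _
  unfold Spec_calcular_tolerancia_falha
  intro hnD
  rw [pv_A_eq_sum, pv_B_eq_sum, pv_sum_eq, pvBH_eq_of m mat d hnD, pvBV_eq_of m mat d hnD]

theorem calcular_tolerancia_falha_changed : Claim_changed_calcular_tolerancia_falha := by
  unfold Claim_changed_calcular_tolerancia_falha; decide

theorem calcular_tolerancia_falha_tight : Claim_exact_calcular_tolerancia_falha := by
  intro m mat d _ _ hD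
  rw [pv_A_eq_sum, pv_B_eq_sum, pv_sum_eq]
  obtain ⟨v, i, hi, j, hj, h1, h2, hw⟩ := hD
  rw [pv_headI] at hw
  cases v
  · simp only [cond] at h2 hw
    have hr := pvE_lt m i (j+1) h2
    have := pvBH_lt m i j hi (by omega)
      (by simpa [pvE, bne_iff_ne] using h1) (by simpa [pvE, bne_iff_ne] using h2) hw
    have := pvBV_le m
    omega
  · simp only [cond] at h2 hw
    rw [Nat.add_zero] at hw
    have hr := pvE_lt m (i+1) j h2
    have hr1 := pvE_lt m i j h1
    have := pvBV_lt m i j (by omega) (by omega)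
      (by simpa [pvE, bne_iff_ne] using h1) (by simpa [pvE, bne_iff_ne] using h2) hw
    have := pvBH_le m
    omega
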